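-- pv_equiv track=rewrite | github.com/AIVLE-School5-DX8-Study/Codingtest-Study | 손주찬/[BOJ]숫자카드/숫자카드.py | find_cards
-- ===== SOURCE A (Python) =====
-- def find_cards(N, cards, M, targets):
--     card_set = set(cards)
--     result = []
--     for target in targets:
--         if target in card_set:
--             result.append(1)
--         else:
--             result.append(0)
--     return result
-- ===== SOURCE B (Python) =====
-- def find_cards(N, cards, M, targets):
--     s = sorted(cards)
--     result = []
--     for t in targets:
--         lo, hi = 0, len(s)
--         found = 0
--         while lo < hi:
--             mid = (lo + hi) // 2
--             if s[mid] == t: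
--                 found = 1
--                 break
--             elif s[mid] < t:
--                 lo = mid + 1
--             else:
--                 hi = mid
--         result.append(found)
--     return result
-- ===== Notes on version B (the rewrite author's own statement) =====
-- stated objective: alternative
-- what changed: B replaces A's hash-set membership test by sorting a copy of cards once and answering each target with an explicit lo/hi binary-search loop over the sorted list.
import Mathlib
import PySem

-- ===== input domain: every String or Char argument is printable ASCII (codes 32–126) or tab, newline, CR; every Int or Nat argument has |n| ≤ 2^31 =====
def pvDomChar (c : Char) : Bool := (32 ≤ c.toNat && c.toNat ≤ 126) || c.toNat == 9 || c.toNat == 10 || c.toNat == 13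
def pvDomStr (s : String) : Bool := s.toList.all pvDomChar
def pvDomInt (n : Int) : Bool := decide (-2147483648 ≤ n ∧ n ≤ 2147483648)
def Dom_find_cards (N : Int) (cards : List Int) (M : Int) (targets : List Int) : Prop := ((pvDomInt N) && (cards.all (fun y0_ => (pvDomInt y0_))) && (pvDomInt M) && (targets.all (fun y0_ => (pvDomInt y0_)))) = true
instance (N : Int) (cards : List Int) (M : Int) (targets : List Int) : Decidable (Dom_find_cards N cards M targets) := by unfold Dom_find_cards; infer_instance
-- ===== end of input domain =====

-- B: same 1/0 answers, but by sorting a copy of cards once and binary-searching each target (alternative algorithm, not claimed faster).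

-- ===== PORT A =====
def find_cards (N : Int) (cards : List Int) (M : Int) (targets : List Int) : List Int :=
  let card_set := PySem.Set.ofList cards
  targets.foldl (fun result target =>
    if PySem.Set.contains card_set target then result ++ [1] else result ++ [0]) []

-- ===== PORT B =====
-- the 'while lo < hi' loop of Source B; returning true = the loop broke with found = 1
def bsearchFound (s : List Int) (t : Int) (lo hi : Nat) : Bool :=
  if _h : lo < hi then
    let mid := (lo + hi) / 2
    let v := s.getD mid 0   -- s[mid]; in the loop always mid < hi ≤ len(s)
    if v = t then true
    else if v < t then bsearchFound s t (mid + 1) hi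
    else bsearchFound s t lo mid
  else false
termination_by hi - lo
decreasing_by all_goals omega

def find_cards_alt (N : Int) (cards : List Int) (M : Int) (targets : List Int) : List Int :=
  let s := PySem.List.sorted cards (fun x => x) false
  targets.foldl (fun result t =>
    result ++ [if bsearchFound s t 0 s.length then (1 : Int) else 0]) []

-- ===== PRECONDITION & SPEC =====
def Spec_find_cards (N : Int) (cards : List Int) (M : Int) (targets : List Int) (out : List Int) : Prop := out = find_cards_alt N cards M targets
instance (N : Int) (cards : List Int) (M : Int) (targets : List Int) (out : List Int) : Decidable (Spec_find_cards N cards M targets out) := by unfold Spec_find_cards; infer_instance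

-- ===== CLAIM (what is proved, stated in full; the proofs are below) =====
def Claim_equal_find_cards : Prop := ∀ (N : Int) (cards : List Int) (M : Int) (targets : List Int), Dom_find_cards N cards M targets → Spec_find_cards N cards M targets (find_cards N cards M targets)

-- ===== LEMMAS AND PROOFS =====

-- binary search on a monotone list reports true iff t occurs in s[lo:hi]
theorem bsearchFound_iff (s : List Int) (t : Int)
    (hmono : ∀ (p q : Nat) (hpq : p ≤ q) (hq : q < s.length), s[p]'(by omega) ≤ s[q]) :
    ∀ (n lo hi : Nat), hi - lo ≤ n → hi ≤ s.length →
    (bsearchFound s t lo hi = true ↔ ∃ i : Nat, lo ≤ i ∧ i < hi ∧ ∃ h : i < s.length, s[i] = t) := by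
  intro n
  induction n with
  | zero =>
    intro lo hi hn hhi
    rw [bsearchFound]
    have hlh : ¬ lo < hi := by omega
    simp only [dif_neg hlh]
    constructor
    · intro hc; exact absurd hc (by simp)
    · rintro ⟨i, h1, h2, _, _⟩; omega
  | succ n ih =>
    intro lo hi hn hhi
    rw [bsearchFound]
    by_cases h : lo < hi
    · simp only [dif_pos h]
      split_ifs with hv hlt
      · -- s.getD mid 0 = t : found
        have hm : (lo + hi) / 2 < s.length := by omega
        rw [List.getD_eq_getElem s 0 hm] at hv
        simp only [true_iff]
        exact ⟨(lo + hi) / 2, by omega, by omega, hm, hv⟩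
      · -- s[mid] < t : search right half
        have hm : (lo + hi) / 2 < s.length := by omega
        rw [List.getD_eq_getElem s 0 hm] at hv hlt
        rw [ih ((lo + hi) / 2 + 1) hi (by omega) hhi]
        constructor
        · rintro ⟨i, h1, h2, h3, h4⟩; exact ⟨i, by omega, h2, h3, h4⟩
        · rintro ⟨i, h1, h2, h3, h4⟩
          refine ⟨i, ?_, h2, h3, h4⟩
          by_contra hc
          have hle : s[i] ≤ s[(lo + hi) / 2] := hmono i ((lo + hi) / 2) (by omega) hm
          omega
      · -- t < s[mid] : search left half
        have hm : (lo + hi) / 2 < s.length := by omega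
        rw [List.getD_eq_getElem s 0 hm] at hv hlt
        rw [ih lo ((lo + hi) / 2) (by omega) (by omega)]
        constructor
        · rintro ⟨i, h1, h2, h3, h4⟩; exact ⟨i, h1, by omega, h3, h4⟩
        · rintro ⟨i, h1, h2, h3, h4⟩
          refine ⟨i, h1, ?_, h3, h4⟩
          by_contra hc
          have hle : s[(lo + hi) / 2] ≤ s[i] := hmono ((lo + hi) / 2) i (by omega) h3
          omega
    · simp only [dif_neg h]
      constructor
      · intro hc; exact absurd hc (by simp)
      · rintro ⟨i, h1, h2, _, _⟩; omega

-- for each target, B's binary search over the sorted copy agrees with A's set membership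
theorem probe_eq (cards : List Int) (t : Int) :
    PySem.Set.contains (PySem.Set.ofList cards) t =
    bsearchFound (PySem.List.sorted cards (fun x => x) false) t 0
      (PySem.List.sorted cards (fun x => x) false).length := by
  set s := PySem.List.sorted cards (fun x => x) false with hs
  have hmono : ∀ (p q : Nat) (hpq : p ≤ q) (hq : q < s.length), s[p]'(by omega) ≤ s[q] := by
    intro p q hpq hq
    exact PySem.List.sorted_id_getElem_mono (xs := cards) hpq hq
  rw [Bool.eq_iff_iff]
  rw [bsearchFound_iff s t hmono (s.length - 0) 0 s.length (by omega) le_rfl]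
  rw [PySem.Set.contains_iff, PySem.Set.mem_ofList]
  constructor
  · intro hmem
    have hms : t ∈ s := (PySem.List.mem_sorted cards (fun x => x) false t).mpr hmem
    obtain ⟨i, hi, hit⟩ := List.mem_iff_getElem.mp hms
    exact ⟨i, Nat.zero_le _, hi, hi, hit⟩
  · rintro ⟨i, _, _, h3, h4⟩
    have hms : t ∈ s := h4 ▸ List.getElem_mem h3
    exact (PySem.List.mem_sorted cards (fun x => x) false t).mp hms

theorem if_push (c : Bool) (acc : List Int) :
    (if c = true then acc ++ [1] else acc ++ [0]) = acc ++ [if c = true then (1 : Int) else 0] := by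
  cases c <;> simp

theorem fold_eq (cards : List Int) (targets : List Int) (acc : List Int) :
    targets.foldl (fun result target =>
      if PySem.Set.contains (PySem.Set.ofList cards) target then result ++ [1] else result ++ [0]) acc =
    targets.foldl (fun result t =>
      result ++ [if bsearchFound (PySem.List.sorted cards (fun x => x) false) t 0
        (PySem.List.sorted cards (fun x => x) false).length then (1 : Int) else 0]) acc := by
  induction targets generalizing acc with
  | nil => rfl
  | cons t ts ih =>
    simp only [List.foldl_cons]
    rw [if_push, probe_eq cards t]
    exact ih _

-- ===== VERDICT (by name: the statement is the Claim_ definition above) =====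
theorem find_cards_spec : Claim_equal_find_cards := by
  intro N cards M targets _
  unfold Spec_find_cards find_cards find_cards_alt
  exact fold_eq cards targets []
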